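-- pv_equiv track=rewrite | github.com/samclearman/wordle | frequencies.py | legal
-- ===== SOURCE A (Python) =====
-- def legal(guess, mask):
--     for l in set(guess):
--         seen_zero = False
--         for i in range(len(guess)):
--             if guess[i] == l and mask[i] == 1 and seen_zero:
--                 return False
--             if guess[i] == l and mask[i] == 0:
--                 seen_zero = True
--     return True
-- ===== SOURCE B (Python) =====
-- def legal(guess, mask):
--     zeroed = set()
--     for i, l in enumerate(guess):
--         m = mask[i]
--         if m == 1 and l in zeroed:
--             return False
--         if m == 0:
--             zeroed.add(l)
--     return True
-- ===== Notes on version B (the rewrite author's own statement) =====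
-- stated objective: faster
-- what changed: A rescans the whole guess once per distinct letter with a per-letter seen_zero flag; B makes a single pass over the indices carrying one set of letters already seen with mask 0 and fails at the first mask-1 hit of such a letter.
-- outside the precondition, e.g. on legal('aaa', [0, 1]): A returns False, B returns False; on legal('ab', [0]): A raises IndexError, B raises IndexError
import Mathlib
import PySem

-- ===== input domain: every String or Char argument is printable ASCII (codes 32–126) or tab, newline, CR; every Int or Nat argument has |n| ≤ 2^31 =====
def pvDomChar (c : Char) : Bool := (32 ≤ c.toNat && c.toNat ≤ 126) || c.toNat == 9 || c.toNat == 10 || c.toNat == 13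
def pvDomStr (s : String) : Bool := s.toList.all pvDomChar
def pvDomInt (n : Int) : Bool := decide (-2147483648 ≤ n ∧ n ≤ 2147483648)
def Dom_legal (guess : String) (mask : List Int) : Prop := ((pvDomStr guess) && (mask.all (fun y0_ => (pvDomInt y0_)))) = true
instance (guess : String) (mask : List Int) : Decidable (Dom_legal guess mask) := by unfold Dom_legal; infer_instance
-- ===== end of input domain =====

-- B replaces A's per-distinct-letter rescans of the guess with a single pass over the indices
-- carrying the set of letters already seen with mask 0 (objective: a different, one-pass algorithm).

-- ===== PORT A =====
-- inner 'for i in range(len(guess))' loop for one letter l; true iff Python hits 'return False'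
def legalInnerA (gs : List Char) (mask : List Int) (l : Char) : List Int → Bool → Bool
  | [], _ => false
  | i :: rest, seen =>
    if PySem.List.pyGetD gs i ' ' = l ∧ PySem.List.pyGetD mask i 0 = 1 ∧ seen = true then true
    else legalInnerA gs mask l rest
      (seen || (decide (PySem.List.pyGetD gs i ' ' = l) && decide (PySem.List.pyGetD mask i 0 = 0)))

-- outer 'for l in set(guess)' loop
def legalOuterA (gs : List Char) (mask : List Int) : List Char → Bool
  | [] => true
  | l :: rest =>
    if legalInnerA gs mask l (PySem.List.pyRange 0 (gs.length : Int) 1) false = true then false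
    else legalOuterA gs mask rest

def legal (guess : String) (mask : List Int) : Bool :=
  legalOuterA guess.toList mask (PySem.Set.ofList guess.toList)

-- ===== PORT B =====
-- single pass over enumerate(guess), carrying the set of letters already seen with mask 0
def legalGoB (mask : List Int) : List (Int × Char) → PySem.Set Char → Bool
  | [], _ => true
  | (i, l) :: rest, z =>
    if PySem.List.pyGetD mask i 0 = 1 ∧ l ∈ z then false
    else legalGoB mask rest (if PySem.List.pyGetD mask i 0 = 0 then PySem.Set.add z l else z)

def legal_alt (guess : String) (mask : List Int) : Bool :=
  legalGoB mask (PySem.List.enumerate guess.toList 0) PySem.Set.empty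

-- ===== PRECONDITION & SPEC =====
-- Pre_ excludes masks shorter than the guess: there Python A's outcome depends on the
-- unspecified iteration order of set(guess) (it may raise IndexError or return False first).
def Pre_legal (guess : String) (mask : List Int) : Prop := guess.toList.length ≤ mask.length
instance (guess : String) (mask : List Int) : Decidable (Pre_legal guess mask) := by unfold Pre_legal; infer_instance
def pvWitness_legal : String × List Int := ("aba", [0, 2, 1])

def Spec_legal (guess : String) (mask : List Int) (out : Bool) : Prop := out = legal_alt guess mask
instance (guess : String) (mask : List Int) (out : Bool) : Decidable (Spec_legal guess mask out) := by unfold Spec_legal; infer_instance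

-- ===== CLAIM (what is proved, stated in full; the proofs are below) =====
def Claim_equal_legal : Prop := ∀ (guess : String) (mask : List Int), Dom_legal guess mask → Pre_legal guess mask → Spec_legal guess mask (legal guess mask)

-- ===== LEMMAS AND PROOFS =====

-- the 'illegal' condition both programs detect: some index t with mask 1 whose letter
-- occurred at an earlier index s with mask 0
def BadN (gs : List Char) (mask : List Int) : Prop :=
  ∃ t : Nat, t < gs.length ∧ PySem.List.pyGetD mask (t : Int) 0 = 1 ∧
    ∃ s : Nat, s < t ∧ gs.getD s ' ' = gs.getD t ' ' ∧ PySem.List.pyGetD mask (s : Int) 0 = 0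

theorem innerA_iff (gs : List Char) (mask : List Int) (l : Char) (n : Int) :
    ∀ (k : Nat) (a : Int) (seen : Bool), n - a = (k : Int) →
    (legalInnerA gs mask l (PySem.List.pyRange a n 1) seen = true ↔
      ∃ t : Int, a ≤ t ∧ t < n ∧ PySem.List.pyGetD gs t ' ' = l ∧ PySem.List.pyGetD mask t 0 = 1 ∧
        (seen = true ∨ ∃ s : Int, a ≤ s ∧ s < t ∧ PySem.List.pyGetD gs s ' ' = l ∧ PySem.List.pyGetD mask s 0 = 0)) := by
  intro k
  induction k with
  | zero =>
    intro a seen h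
    rw [PySem.List.pyRange_one_eq_nil (by omega)]
    simp [legalInnerA]
    intro t h1 h2
    omega
  | succ k ih =>
    intro a seen h
    rw [PySem.List.pyRange_one_cons (by omega)]
    simp only [legalInnerA]
    by_cases hP : PySem.List.pyGetD gs a ' ' = l ∧ PySem.List.pyGetD mask a 0 = 1 ∧ seen = true
    · simp only [if_pos hP]
      constructor
      · intro _
        exact ⟨a, le_refl a, by omega, hP.1, hP.2.1, Or.inl hP.2.2⟩
      · intro _; trivial
    · rw [if_neg hP]
      rw [ih (a + 1) _ (by omega)]
      constructor
      · rintro ⟨t, ht1, ht2, ht3, ht4, hd⟩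
        refine ⟨t, by omega, ht2, ht3, ht4, ?_⟩
        rcases hd with hseen | ⟨s, hs1, hs2, hs3, hs4⟩
        · simp only [Bool.or_eq_true, Bool.and_eq_true, decide_eq_true_eq] at hseen
          rcases hseen with h' | ⟨hz1, hz2⟩
          · exact Or.inl h'
          · exact Or.inr ⟨a, le_refl a, by omega, hz1, hz2⟩
        · exact Or.inr ⟨s, by omega, hs2, hs3, hs4⟩
      · rintro ⟨t, ht1, ht2, ht3, ht4, hd⟩
        have hta : a + 1 ≤ t := by
          rcases lt_or_ge a t with h' | h'
          · omega
          · have : t = a := by omega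
            subst this
            exfalso
            rcases hd with hseen | ⟨s, hs1, hs2, _, _⟩
            · exact hP ⟨ht3, ht4, hseen⟩
            · omega
        refine ⟨t, hta, ht2, ht3, ht4, ?_⟩
        rcases hd with hseen | ⟨s, hs1, hs2, hs3, hs4⟩
        · left; simp [hseen]
        · rcases eq_or_lt_of_le hs1 with h' | h'
          · left
            simp only [Bool.or_eq_true, Bool.and_eq_true, decide_eq_true_eq]
            right
            constructor
            · rw [← h'] at hs3; exact hs3
            · rw [← h'] at hs4; exact hs4
          · exact Or.inr ⟨s, by omega, hs2, hs3, hs4⟩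

theorem outerA_iff (gs : List Char) (mask : List Int) :
    ∀ letters : List Char,
    (legalOuterA gs mask letters = true ↔
      ∀ l ∈ letters, legalInnerA gs mask l (PySem.List.pyRange 0 (gs.length : Int) 1) false = false) := by
  intro letters
  induction letters with
  | nil => simp [legalOuterA]
  | cons l rest ih =>
    simp only [legalOuterA]
    by_cases hl : legalInnerA gs mask l (PySem.List.pyRange 0 (gs.length : Int) 1) false = true
    · rw [if_pos hl]
      simp only [Bool.false_eq_true, false_iff, not_forall]
      exact ⟨l, List.mem_cons_self, by simp [hl]⟩
    · rw [if_neg hl, ih]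
      constructor
      · intro hall l' hl'
        rcases List.mem_cons.mp hl' with h | h
        · subst h
          exact Bool.not_eq_true _ |>.mp hl
        · exact hall l' h
      · intro hall l' hl'
        exact hall l' (List.mem_cons_of_mem _ hl')

theorem legal_iff (guess : String) (mask : List Int) :
    legal guess mask = true ↔ ¬ BadN guess.toList mask := by
  unfold legal
  set gs := guess.toList with hgs
  rw [outerA_iff]
  have hin : ∀ l : Char,
      (legalInnerA gs mask l (PySem.List.pyRange 0 (gs.length : Int) 1) false = true ↔
        ∃ t : Int, 0 ≤ t ∧ t < (gs.length : Int) ∧ PySem.List.pyGetD gs t ' ' = l ∧ PySem.List.pyGetD mask t 0 = 1 ∧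
          ((false : Bool) = true ∨ ∃ s : Int, 0 ≤ s ∧ s < t ∧ PySem.List.pyGetD gs s ' ' = l ∧ PySem.List.pyGetD mask s 0 = 0)) :=
    fun l => innerA_iff gs mask l (gs.length : Int) gs.length 0 false (by simp)
  constructor
  · intro hall hbad
    obtain ⟨t, ht, hm1, s, hst, heq, hm0⟩ := hbad
    have hmem : gs.getD t ' ' ∈ PySem.Set.ofList gs := by
      rw [PySem.Set.mem_ofList]
      rw [List.getD_eq_getElem gs ' ' ht]
      exact List.getElem_mem ht
    have hfalse := hall _ hmem
    have htrue := (hin (gs.getD t ' ')).mpr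
      ⟨(t : Int), by omega, by exact_mod_cast ht, by simp, hm1,
        Or.inr ⟨(s : Int), by omega, by exact_mod_cast hst, by simpa using heq, hm0⟩⟩
    rw [htrue] at hfalse
    simp at hfalse
  · intro hnb l hl
    by_contra hne
    have htrue : legalInnerA gs mask l (PySem.List.pyRange 0 (gs.length : Int) 1) false = true := by
      revert hne
      cases legalInnerA gs mask l (PySem.List.pyRange 0 (gs.length : Int) 1) false <;> simp
    obtain ⟨t, ht0, htn, hgl, hm1, hd⟩ := (hin l).mp htrue
    rcases hd with hF | ⟨s, hs0, hst, hgs2, hm0⟩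
    · simp at hF
    · apply hnb
      have hct : ((t.toNat : Nat) : Int) = t := Int.toNat_of_nonneg ht0
      have hcs : ((s.toNat : Nat) : Int) = s := Int.toNat_of_nonneg hs0
      refine ⟨t.toNat, by omega, by rwa [hct], s.toNat, by omega, ?_, by rwa [hcs]⟩
      have h1 : PySem.List.pyGetD gs ((t.toNat : Nat) : Int) ' ' = gs.getD t.toNat ' ' := by rw [PySem.List.pyGetD_natCast]
      have h2 : PySem.List.pyGetD gs ((s.toNat : Nat) : Int) ' ' = gs.getD s.toNat ' ' := by rw [PySem.List.pyGetD_natCast]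
      rw [hct] at h1
      rw [hcs] at h2
      rw [← h1, ← h2, hgl, hgs2]

theorem goB_iff (mask : List Int) :
    ∀ (sub : List Char) (a : Nat) (z : PySem.Set Char),
    (legalGoB mask (PySem.List.enumerate sub (a : Int)) z = true ↔
      ¬ ∃ t : Nat, t < sub.length ∧ PySem.List.pyGetD mask ((a + t : Nat) : Int) 0 = 1 ∧
        (sub.getD t ' ' ∈ z ∨ ∃ s : Nat, s < t ∧ sub.getD s ' ' = sub.getD t ' ' ∧ PySem.List.pyGetD mask ((a + s : Nat) : Int) 0 = 0)) := by
  intro sub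
  induction sub with
  | nil =>
    intro a z
    simp [PySem.List.enumerate, legalGoB]
  | cons x xs ih =>
    intro a z
    rw [PySem.List.enumerate_cons]
    simp only [legalGoB]
    by_cases hP : PySem.List.pyGetD mask (a : Int) 0 = 1 ∧ x ∈ z
    · rw [if_pos hP]
      simp only [Bool.false_eq_true, false_iff, not_not]
      exact ⟨0, by simp, by simpa using hP.1, Or.inl (by simpa using hP.2)⟩
    · rw [if_neg hP]
      have hcast : (a : Int) + 1 = ((a + 1 : Nat) : Int) := by push_cast; ring
      rw [hcast, ih (a + 1)]
      constructor
      · intro hno ⟨t, ht, hm1, hd⟩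
        match t with
        | 0 =>
          exact hP ⟨by simpa using hm1, by
            rcases hd with h' | ⟨s, hs, _, _⟩
            · simpa using h'
            · omega⟩
        | t' + 1 =>
          apply hno
          refine ⟨t', by simpa using ht, ?_, ?_⟩
          · have : a + 1 + t' = a + (t' + 1) := by omega
            rw [this]; exact hm1
          · rcases hd with h' | ⟨s, hs, heq, hm0⟩
            · left
              simp only [List.getD_cons_succ] at h'
              by_cases hz : PySem.List.pyGetD mask (a : Int) 0 = 0
              · rw [if_pos hz]; exact (PySem.Set.mem_add _ _ _).mpr (Or.inl h')
              · rw [if_neg hz]; exact h'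
            · match s with
              | 0 =>
                left
                simp only [List.getD_cons_zero, List.getD_cons_succ] at heq hm0
                have hz : PySem.List.pyGetD mask (a : Int) 0 = 0 := by simpa using hm0
                rw [if_pos hz]
                exact (PySem.Set.mem_add _ _ _).mpr (Or.inr heq.symm)
              | s' + 1 =>
                right
                refine ⟨s', by omega, by simpa using heq, ?_⟩
                have : a + 1 + s' = a + (s' + 1) := by omega
                rw [this]; exact hm0
      · intro hno ⟨t', ht', hm1, hd⟩
        apply hno
        refine ⟨t' + 1, by simpa using ht', ?_, ?_⟩
        · have : a + (t' + 1) = a + 1 + t' := by omega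
          rw [this]; exact hm1
        · rcases hd with h' | ⟨s', hs', heq, hm0⟩
          · by_cases hz : PySem.List.pyGetD mask (a : Int) 0 = 0
            · rw [if_pos hz] at h'
              rcases (PySem.Set.mem_add _ _ _).mp h' with h'' | h''
              · exact Or.inl (by simpa using h'')
              · refine Or.inr ⟨0, by omega, ?_, by simpa using hz⟩
                simpa using h''.symm
            · rw [if_neg hz] at h'
              exact Or.inl (by simpa using h')
          · refine Or.inr ⟨s' + 1, by omega, by simpa using heq, ?_⟩
            have : a + (s' + 1) = a + 1 + s' := by omega
            rw [this]; exact hm0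

theorem legal_alt_iff (guess : String) (mask : List Int) :
    legal_alt guess mask = true ↔ ¬ BadN guess.toList mask := by
  unfold legal_alt BadN
  have h0 : (0 : Int) = ((0 : Nat) : Int) := by norm_num
  rw [h0, goB_iff mask guess.toList 0 PySem.Set.empty]
  apply not_congr
  constructor
  · rintro ⟨t, ht, hm1, hd⟩
    rcases hd with hmem | ⟨s, hs, heq, hm0⟩
    · simp [PySem.Set.empty] at hmem
    · exact ⟨t, ht, by simpa using hm1, s, hs, heq, by simpa using hm0⟩
  · rintro ⟨t, ht, hm1, s, hs, heq, hm0⟩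
    exact ⟨t, ht, by simpa using hm1, Or.inr ⟨s, hs, heq, by simpa using hm0⟩⟩

-- ===== VERDICT (by name: the statement is the Claim_ definition above) =====
theorem legal_spec : Claim_equal_legal := by
  intro guess mask _ _
  unfold Spec_legal
  rw [Bool.eq_iff_iff, legal_iff guess mask, legal_alt_iff guess mask]
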